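-- pv_equiv track=rewrite | github.com/dianaract1311/ep2_26 | funcoes.py | calcula_pontos_quina
-- ===== SOURCE A (Python) =====
-- def calcula_pontos_quina(dados):   ## question 10
--     contagem = {}
--     i = 0
--
--     # contar ocorrências
--     while i < len(dados):
--         valor = dados[i]
--
--         if valor in contagem:
--             contagem[valor] += 1
--         else:
--             contagem[valor] = 1
--
--         i += 1
--
--     # verificar se existe 5 ou mais
--     chaves = list(contagem.keys())
--     i = 0
--
--     while i < len(chaves):
--         if contagem[chaves[i]] >= 5:
--             return 50
--         i += 1
--
--     return 0
-- ===== SOURCE B (Python) =====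
-- def calcula_pontos_quina(dados):
--     # single pass: count as we go and return 50 the moment any value hits 5
--     contagem = {}
--     for valor in dados:
--         c = contagem.get(valor, 0) + 1
--         if c >= 5:
--             return 50
--         contagem[valor] = c
--     return 0
-- ===== Notes on version B (the rewrite author's own statement) =====
-- stated objective: faster
-- what changed: Fuses A's two sequential while-loops (count all occurrences into a dict, then scan the key list) into one traversal that maintains the running counts and returns 50 immediately when any count reaches 5.
import Mathlib
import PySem

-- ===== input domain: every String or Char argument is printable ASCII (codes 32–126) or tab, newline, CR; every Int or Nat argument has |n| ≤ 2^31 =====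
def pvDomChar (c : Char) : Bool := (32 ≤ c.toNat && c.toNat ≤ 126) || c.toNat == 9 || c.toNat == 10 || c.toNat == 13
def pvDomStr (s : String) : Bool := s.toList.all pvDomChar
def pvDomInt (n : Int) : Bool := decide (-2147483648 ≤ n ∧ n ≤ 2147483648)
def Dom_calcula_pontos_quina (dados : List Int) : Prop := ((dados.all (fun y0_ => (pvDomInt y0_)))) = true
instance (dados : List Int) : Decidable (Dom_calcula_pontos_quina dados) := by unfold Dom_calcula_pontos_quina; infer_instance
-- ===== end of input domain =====

-- B fuses A's count-then-scan into one counting pass with an early return; alternative decomposition, same asymptotic cost.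

-- ===== PORT A =====
-- second while-loop of A: scan the key list, return 50 at the first key with count >= 5
def pvScanA (contagem : PySem.Dict Int Int) : List Int → Int
  | [] => 0
  | k :: rest => if 5 ≤ contagem.getD k 0 then 50 else pvScanA contagem rest

def calcula_pontos_quina (dados : List Int) : Int :=
  let contagem := dados.foldl
    (fun d valor => if d.contains valor then d.insert valor (d.getD valor 0 + 1) else d.insert valor 1)
    PySem.Dict.empty
  pvScanA contagem contagem.keys

-- ===== PORT B =====
-- single pass: running counts; return 50 the moment a count reaches 5
def pvGoB (contagem : PySem.Dict Int Int) : List Int → Int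
  | [] => 0
  | valor :: rest =>
      let c := contagem.getD valor 0 + 1
      if 5 ≤ c then 50 else pvGoB (contagem.insert valor c) rest

def calcula_pontos_quina_alt (dados : List Int) : Int :=
  pvGoB PySem.Dict.empty dados

-- ===== PRECONDITION & SPEC =====
def Spec_calcula_pontos_quina (dados : List Int) (out : Int) : Prop := out = calcula_pontos_quina_alt dados
instance (dados : List Int) (out : Int) : Decidable (Spec_calcula_pontos_quina dados out) := by unfold Spec_calcula_pontos_quina; infer_instance

-- ===== CLAIM (what is proved, stated in full; the proofs are below) =====
def Claim_equal_calcula_pontos_quina : Prop := ∀ (dados : List Int), Dom_calcula_pontos_quina dados → Spec_calcula_pontos_quina dados (calcula_pontos_quina dados)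

-- ===== LEMMAS AND PROOFS =====

-- both sides computed against the common reference value
def pvRef (dados : List Int) : Int :=
  if dados.any (fun v => 5 ≤ (dados.count v : Int)) then 50 else 0

lemma pvScanA_eq (d : PySem.Dict Int Int) (l : List Int) :
    pvScanA d l = if l.any (fun k => 5 ≤ d.getD k 0) then 50 else 0 := by
  induction l with
  | nil => simp [pvScanA]
  | cons k rest ih =>
      by_cases h : 5 ≤ d.getD k 0 <;> simp [pvScanA, h, ih]

lemma portA_eq_ref (dados : List Int) : calcula_pontos_quina dados = pvRef dados := by
  unfold calcula_pontos_quina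
  have hstep : (fun (d : PySem.Dict Int Int) (valor : Int) =>
      if d.contains valor then d.insert valor (d.getD valor 0 + 1) else d.insert valor 1)
      = fun d valor => d.insert valor (d.getD valor 0 + 1) := by
    funext d valor
    by_cases h : d.contains valor
    · simp [h]
    · have hc : d.contains valor = false := by simpa using h
      simp [hc, PySem.Dict.getD_of_not_contains d 0 hc]
  rw [hstep, PySem.Dict.foldl_insert_getD_add_one_eq_counter, pvScanA_eq, pvRef]
  have hmem : ∀ v : Int, v ∈ (PySem.Dict.counter dados).keys ↔ v ∈ dados := by
    intro v
    rw [PySem.Dict.keys_counter]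
    exact PySem.Set.mem_ofList dados v
  by_cases h : dados.any (fun v => 5 ≤ (dados.count v : Int))
  · rw [if_pos h, if_pos]
    rw [List.any_eq_true] at h ⊢
    obtain ⟨v, hv, h5⟩ := h
    exact ⟨v, (hmem v).mpr hv, by simpa [PySem.Dict.getD_counter] using h5⟩
  · rw [if_neg h, if_neg]
    intro hc
    apply h
    rw [List.any_eq_true] at hc ⊢
    obtain ⟨v, hv, h5⟩ := hc
    exact ⟨v, (hmem v).mp hv, by simpa [PySem.Dict.getD_counter] using h5⟩

lemma pvGoB_eq (rest : List Int) : ∀ (pre : List Int) (d : PySem.Dict Int Int),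
    (∀ v, d.getD v 0 = (pre.count v : Int)) →
    (∀ v, pre.count v ≤ 4) →
    pvGoB d rest = pvRef (pre ++ rest) := by
  induction rest with
  | nil =>
      intro pre d hd h4
      simp only [pvGoB, pvRef, List.append_nil]
      rw [if_neg]
      intro h
      rw [List.any_eq_true] at h
      obtain ⟨v, _, h5⟩ := h
      have := h4 v
      simp only [decide_eq_true_eq] at h5
      omega
  | cons valor rest ih =>
      intro pre d hd h4
      simp only [pvGoB]
      by_cases h5 : 5 ≤ d.getD valor 0 + 1
      · rw [if_pos h5, pvRef, if_pos]
        rw [List.any_eq_true]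
        refine ⟨valor, by simp, ?_⟩
        have hcnt : pre.count valor + 1 ≤ (pre ++ valor :: rest).count valor := by
          simp [List.count_append]
        have := hd valor
        simp only [decide_eq_true_eq]
        omega
      · rw [if_neg h5]
        have hc : pre.count valor ≤ 3 := by have := hd valor; omega
        have hres := ih (pre ++ [valor]) (d.insert valor (d.getD valor 0 + 1))
          (by
            intro v
            rw [PySem.Dict.getD_insert]
            by_cases hv : v = valor
            · subst hv
              simp [List.count_append, hd v]
            · simp [hv, List.count_append, hd v, Ne.symm hv])
          (by
            intro v
            by_cases hv : v = valor
            · subst hv; simp [List.count_append]; omega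
            · simp [List.count_append, Ne.symm hv]
              exact h4 v)
        rw [hres, List.append_assoc]
        rfl

-- ===== VERDICT (by name: the statement is the Claim_ definition above) =====
theorem calcula_pontos_quina_spec : Claim_equal_calcula_pontos_quina := by
  intro dados _
  unfold Spec_calcula_pontos_quina calcula_pontos_quina_alt
  rw [portA_eq_ref]
  have := pvGoB_eq dados [] PySem.Dict.empty (by simp [PySem.Dict.getD_empty]) (by simp)
  simp only [List.nil_append] at this
  rw [this]
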